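-- pv_equiv track=rewrite | github.com/konstmax1388/Fabric_Awinings_release | backend/api/services/notification_email.py | parse_recipient_list
-- ===== SOURCE A (Python) =====
-- def parse_recipient_list(raw: str) -> list[str]:
--     if not (raw or "").strip():
--         return []
--     out: list[str] = []
--     for line in raw.replace(";", "\n").split("\n"):
--         for part in line.split(","):
--             p = part.strip()
--             if p and "@" in p:
--                 out.append(p)
--     seen: set[str] = set()
--     uniq: list[str] = []
--     for e in out:
--         el = e.lower()
--         if el not in seen:
--             seen.add(el)
--             uniq.append(e)
--     return uniq
-- ===== SOURCE B (Python) =====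
-- def parse_recipient_list(raw: str) -> list[str]:
--     # Single character-level scan: no replace/split passes, no post-hoc dedup pass.
--     result: list[str] = []
--     seen: set[str] = set()
--     buf: list[str] = []
--     for ch in (raw or "") + "\n":
--         if ch in ";\n,":
--             p = "".join(buf).strip()
--             buf = []
--             if p and "@" in p and p.lower() not in seen:
--                 seen.add(p.lower())
--                 result.append(p)
--         else:
--             buf.append(ch)
--     return result
-- ===== Notes on version B (the rewrite author's own statement) =====
-- stated objective: alternative
-- what changed: A runs a staged pipeline (replace semicolons with newlines, split on newlines, split each line on commas, strip and filter, then a second dedup pass with a seen-set over the collected list); B is a single character-level scanner that cuts tokens at the semicolon/newline/comma delimiters itself with one running buffer and filters + case-insensitively dedups each token the moment it is closed, with no replace/split passes, no second pass and no empty-input guard.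
import Mathlib
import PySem

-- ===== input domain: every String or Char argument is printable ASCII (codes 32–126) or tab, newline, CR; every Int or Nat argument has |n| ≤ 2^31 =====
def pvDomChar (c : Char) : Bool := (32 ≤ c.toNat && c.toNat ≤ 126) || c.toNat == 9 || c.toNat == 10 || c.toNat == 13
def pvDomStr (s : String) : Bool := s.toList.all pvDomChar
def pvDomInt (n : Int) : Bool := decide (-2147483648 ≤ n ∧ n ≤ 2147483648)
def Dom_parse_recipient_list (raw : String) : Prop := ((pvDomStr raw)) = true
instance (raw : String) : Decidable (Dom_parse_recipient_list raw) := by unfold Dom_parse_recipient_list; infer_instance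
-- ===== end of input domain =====

-- B replaces A's pipeline (replace semicolons with newlines, split on newlines, split each line on
-- commas, strip, filter, then a second dedup pass) by one character-level scan that cuts tokens at the
-- delimiters itself and filters + dedups each token as it is closed; objective: alternative, same cost.

-- ===== PORT A =====
def parse_recipient_list (raw : String) : List String :=
  let s := raw.toList
  if (PySem.Chars.strip s).isEmpty then []
  else
    let out : List (List Char) :=
      (PySem.Chars.splitOn (PySem.Chars.replace s [';'] ['\n']) ['\n']).foldl
        (fun out line =>
          (PySem.Chars.splitOn line [',']).foldl
            (fun out part =>
              let p := PySem.Chars.strip part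
              if !p.isEmpty && PySem.Chars.isIn ['@'] p then out ++ [p] else out)
            out)
        []
    let fin := out.foldl
      (fun (st : PySem.Set (List Char) × List (List Char)) e =>
        let el := PySem.Chars.lower e
        if PySem.Set.contains st.1 el then st else (PySem.Set.add st.1 el, st.2 ++ [e]))
      (PySem.Set.empty, [])
    fin.2.map String.ofList

-- ===== PORT B =====
-- B's loop body: state = (seen, result, buf); buf is the Python list of chars ("".join is concatenation).
def pvScanStep (st : PySem.Set (List Char) × List (List Char) × List Char) (ch : Char) :
    PySem.Set (List Char) × List (List Char) × List Char :=
  if PySem.Chars.isIn [ch] [';', '\n', ','] then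
    let p := PySem.Chars.strip st.2.2
    if !p.isEmpty && PySem.Chars.isIn ['@'] p && !PySem.Set.contains st.1 (PySem.Chars.lower p) then
      (PySem.Set.add st.1 (PySem.Chars.lower p), st.2.1 ++ [p], [])
    else (st.1, st.2.1, [])
  else (st.1, st.2.1, st.2.2 ++ [ch])

def parse_recipient_list_alt (raw : String) : List String :=
  (((raw.toList ++ ['\n']).foldl pvScanStep (PySem.Set.empty, [], [])).2.1).map String.ofList

-- ===== PRECONDITION & SPEC =====
def Spec_parse_recipient_list (raw : String) (out : List String) : Prop := out = parse_recipient_list_alt raw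
instance (raw : String) (out : List String) : Decidable (Spec_parse_recipient_list raw out) := by unfold Spec_parse_recipient_list; infer_instance

-- ===== CLAIM (what is proved, stated in full; the proofs are below) =====
def Claim_equal_parse_recipient_list : Prop := ∀ (raw : String), Dom_parse_recipient_list raw → Spec_parse_recipient_list raw (parse_recipient_list raw)

-- ===== LEMMAS AND PROOFS =====
def pvSubst (c : Char) : Char := if c = ';' then '\n' else c

theorem replace_go_single (s : List Char) : ∀ (fuel : Nat) (acc : List Char), s.length ≤ fuel →
    PySem.Chars.replace.go [';'] ['\n'] fuel s acc = acc.reverse ++ s.map pvSubst := by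
  induction s with
  | nil => intro fuel acc h; cases fuel <;> simp [PySem.Chars.replace.go]
  | cons c t ih =>
    intro fuel acc h
    cases fuel with
    | zero => simp at h
    | succ f =>
      rw [PySem.Chars.replace.go]
      by_cases hc : c = ';'
      · subst hc
        simp only [List.isPrefixOf, beq_self_eq_true, Bool.true_and, if_true,
          List.length_cons, List.drop_succ_cons, List.reverse_cons, List.reverse_nil, List.length_nil,
          List.drop, List.nil_append]
        rw [ih f _ (by simpa using h)]
        simp [pvSubst]
      · have : [';'].isPrefixOf (c :: t) = false := by
          simp [List.isPrefixOf]; exact fun h' => hc h'.symm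
        rw [this]
        simp only [Bool.false_eq_true, if_false]
        rw [ih f _ (by simpa using h)]
        simp [pvSubst, hc]

theorem replace_single (s : List Char) : PySem.Chars.replace s [';'] ['\n'] = s.map pvSubst := by
  rw [PySem.Chars.replace]
  simp [replace_go_single s s.length [] (le_refl _)]

def pvSplit1 (d : Char) : List Char → List Char → List (List Char)
  | [], buf => [buf]
  | c :: t, buf => if c = d then buf :: pvSplit1 d t [] else pvSplit1 d t (buf ++ [c])

theorem splitOn_go_single (d : Char) (s : List Char) : ∀ (fuel : Nat) (cur : List Char) (acc : List (List Char)),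
    s.length < fuel →
    PySem.Chars.splitOn.go [d] fuel s cur acc = acc.reverse ++ pvSplit1 d s cur.reverse := by
  induction s with
  | nil =>
    intro fuel cur acc h
    cases fuel with
    | zero => simp at h
    | succ f => simp [PySem.Chars.splitOn.go, pvSplit1]
  | cons c t ih =>
    intro fuel cur acc h
    cases fuel with
    | zero => simp at h
    | succ f =>
      rw [PySem.Chars.splitOn.go]
      by_cases hc : c = d
      · subst hc
        simp only [List.isPrefixOf, beq_self_eq_true, Bool.true_and, if_true, List.length_cons,
          List.drop_succ_cons, List.length_nil, List.drop]
        rw [ih f [] _ (by simpa using h)]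
        simp [pvSplit1]
      · have hp : [d].isPrefixOf (c :: t) = false := by
          simp [List.isPrefixOf]; exact fun h' => hc h'.symm
        rw [hp]
        simp only [Bool.false_eq_true, if_false]
        rw [ih f (c :: cur) acc (by simpa using Nat.lt_of_succ_lt_succ h)]
        simp [pvSplit1, hc]

theorem splitOn_single (d : Char) (s : List Char) :
    PySem.Chars.splitOn s [d] = pvSplit1 d s [] := by
  rw [PySem.Chars.splitOn]
  rw [splitOn_go_single d s (s.length + 1) [] [] (by omega)]
  simp

def pvIsD (c : Char) : Bool := c == ';' || c == '\n' || c == ','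

def pvSplit3 : List Char → List Char → List (List Char)
  | [], buf => [buf]
  | c :: t, buf => if pvIsD c then buf :: pvSplit3 t [] else pvSplit3 t (buf ++ [c])

theorem pvSplit1_ne_nil (d : Char) (s buf : List Char) : pvSplit1 d s buf ≠ [] := by
  induction s generalizing buf with
  | nil => simp [pvSplit1]
  | cons c t ih => simp only [pvSplit1]; split <;> simp [ih]

theorem pvSplit3_ne_nil (s buf : List Char) : pvSplit3 s buf ≠ [] := by
  induction s generalizing buf with
  | nil => simp [pvSplit3]
  | cons c t ih => simp only [pvSplit3]; split <;> simp [ih]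

theorem pvSplit1_concat (d : Char) (s buf : List Char) (c : Char) (init : List (List Char)) (last : List Char)
    (h : pvSplit1 d s buf = init ++ [last]) :
    pvSplit1 d (s ++ [c]) buf = if c = d then init ++ [last, []] else init ++ [last ++ [c]] := by
  induction s generalizing buf init last with
  | nil =>
    simp only [pvSplit1] at h
    cases init with
    | nil =>
      simp only [List.nil_append, List.cons.injEq, and_true] at h
      subst h
      by_cases hc : c = d <;> simp [pvSplit1, hc]
    | cons x xs => simp at h
  | cons a t ih =>
    rw [List.cons_append]
    simp only [pvSplit1] at h ⊢
    by_cases ha : a = d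
    · rw [if_pos ha] at h ⊢
      cases init with
      | nil =>
        exfalso
        simp at h
        exact pvSplit1_ne_nil d t [] h.2
      | cons x xs =>
        simp only [List.cons_append, List.cons.injEq] at h
        obtain ⟨hx, ht⟩ := h
        rw [ih [] xs last ht, hx]
        split <;> simp
    · rw [if_neg ha] at h ⊢
      exact ih (buf ++ [a]) init last h

theorem pvSplit3_concat_delim (s buf : List Char) (c : Char) (hc : pvIsD c = true) :
    pvSplit3 (s ++ [c]) buf = pvSplit3 s buf ++ [[]] := by
  induction s generalizing buf with
  | nil => simp [pvSplit3, hc]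
  | cons a t ih =>
    rw [List.cons_append]
    simp only [pvSplit3]
    split <;> simp [ih]

def pvIsD2 (c : Char) : Bool := c == '\n' || c == ','

def pvSplit2 : List Char → List Char → List (List Char)
  | [], buf => [buf]
  | c :: t, buf => if pvIsD2 c then buf :: pvSplit2 t [] else pvSplit2 t (buf ++ [c])

-- composing the '\n'-split with a ','-split of each line is one two-delimiter split
theorem pv_comp (s : List Char) : ∀ (buf : List Char) (init : List (List Char)) (last : List Char),
    pvSplit1 ',' buf [] = init ++ [last] →
    (pvSplit1 '\n' s buf).flatMap (fun l => pvSplit1 ',' l []) = init ++ pvSplit2 s last := by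
  induction s with
  | nil =>
    intro buf init last h
    simp [pvSplit1, pvSplit2, h]
  | cons c t ih =>
    intro buf init last h
    simp only [pvSplit1, pvSplit2]
    by_cases hn : c = '\n'
    · rw [if_pos hn]
      have hd2 : pvIsD2 c = true := by simp [pvIsD2, hn]
      rw [hd2]
      simp only [if_true, List.flatMap_cons]
      rw [ih [] [] [] (by simp [pvSplit1]), h]
      simp
    · rw [if_neg hn]
      by_cases hm : c = ','
      · have hd2 : pvIsD2 c = true := by simp [pvIsD2, hm]
        rw [hd2]
        simp only [if_true]
        have hb : pvSplit1 ',' (buf ++ [c]) [] = (init ++ [last]) ++ [[]] := by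
          rw [pvSplit1_concat ',' buf [] c init last h, if_pos hm]
          simp
        rw [ih (buf ++ [c]) (init ++ [last]) [] (by simpa using hb)]
        simp
      · have hd2 : pvIsD2 c = false := by simp [pvIsD2, hn, hm]
        rw [hd2]
        simp only [Bool.false_eq_true, if_false]
        have hb : pvSplit1 ',' (buf ++ [c]) [] = init ++ [last ++ [c]] := by
          rw [pvSplit1_concat ',' buf [] c init last h, if_neg hm]
        exact ih (buf ++ [c]) init (last ++ [c]) hb

theorem pvSplit2_map_subst (s : List Char) : ∀ buf : List Char,
    pvSplit2 (s.map pvSubst) buf = pvSplit3 s buf := by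
  induction s with
  | nil => intro buf; simp [pvSplit2, pvSplit3]
  | cons c t ih =>
    intro buf
    simp only [List.map_cons, pvSplit2, pvSplit3]
    have hd : pvIsD2 (pvSubst c) = pvIsD c := by
      by_cases h1 : c = ';' <;> by_cases h2 : c = '\n' <;> by_cases h3 : c = ',' <;>
        first
          | simp [pvIsD, pvIsD2, pvSubst, h1, h2, h3, beq_eq_false_iff_ne.mpr h1,
              beq_eq_false_iff_ne.mpr h2, beq_eq_false_iff_ne.mpr h3]
          | simp [pvIsD, pvIsD2, pvSubst, h1, h2, h3]
    rw [hd]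
    by_cases h3 : pvIsD c = true
    · rw [if_pos h3, if_pos h3, ih]
    · have hcs : pvSubst c = c := by
        simp [pvIsD] at h3
        simp [pvSubst, h3.1]
      rw [if_neg h3, if_neg h3, hcs, ih]

theorem pv_isIn_delims (ch : Char) : PySem.Chars.isIn [ch] [';', '\n', ','] = pvIsD ch := by
  by_cases h : pvIsD ch = true
  · rw [h, PySem.Chars.isIn_iff_infix, List.singleton_infix_iff]
    simp [pvIsD, beq_iff_eq] at h
    rcases h with (h | h) | h <;> simp [h]
  · rw [Bool.eq_false_iff.mpr h, PySem.Chars.isIn_eq_false_iff, List.singleton_infix_iff]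
    simp [pvIsD, beq_iff_eq] at h
    simp [h.1.1, h.1.2, h.2]

-- B's per-token action, extracted from the scanner's delimiter branch
def pvTStep (st : PySem.Set (List Char) × List (List Char)) (tok : List Char) :
    PySem.Set (List Char) × List (List Char) :=
  let p := PySem.Chars.strip tok
  if !p.isEmpty && PySem.Chars.isIn ['@'] p && !PySem.Set.contains st.1 (PySem.Chars.lower p) then
    (PySem.Set.add st.1 (PySem.Chars.lower p), st.2 ++ [p])
  else st

-- the scanner is the token fold: state after cs = (fold over the closed tokens, the open buffer)
theorem pv_scan (cs : List Char) : ∀ (seen : PySem.Set (List Char)) (res : List (List Char))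
    (buf : List Char) (toks : List (List Char)) (last : List Char),
    pvSplit3 cs buf = toks ++ [last] →
    cs.foldl pvScanStep (seen, res, buf) =
      ((toks.foldl pvTStep (seen, res)).1, (toks.foldl pvTStep (seen, res)).2, last) := by
  induction cs with
  | nil =>
    intro seen res buf toks last h
    simp only [pvSplit3] at h
    cases toks with
    | nil => simp only [List.nil_append, List.cons.injEq, and_true] at h; simp [h]
    | cons x xs => simp at h
  | cons c t ih =>
    intro seen res buf toks last h
    simp only [pvSplit3] at h
    simp only [List.foldl_cons]
    by_cases hc : pvIsD c = true
    · rw [hc] at h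
      simp only [if_true] at h
      cases toks with
      | nil =>
        exfalso
        simp at h
        exact pvSplit3_ne_nil t [] h.2
      | cons x xs =>
        simp only [List.cons_append, List.cons.injEq] at h
        obtain ⟨hx, ht⟩ := h
        have hstep : pvScanStep (seen, res, buf) c =
            ((pvTStep (seen, res) buf).1, (pvTStep (seen, res) buf).2, []) := by
          simp only [pvScanStep, pvTStep, pv_isIn_delims, hc, if_true]
          split <;> rfl
        rw [hstep, ih _ _ [] xs last ht, ← hx]
        simp
    · rw [Bool.eq_false_iff.mpr hc] at h
      simp only [Bool.false_eq_true, if_false] at h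
      have hstep : pvScanStep (seen, res, buf) c = (seen, res, buf ++ [c]) := by
        simp [pvScanStep, pv_isIn_delims, Bool.eq_false_iff.mpr hc]
      rw [hstep, ih _ _ (buf ++ [c]) toks last h]

-- A's collection pass (nested foldl with conditional append) is the filtered, strip-mapped flat token list.
theorem pv_out_eq (lines : List (List Char)) (acc : List (List Char)) :
    lines.foldl
      (fun out line =>
        (PySem.Chars.splitOn line [',']).foldl
          (fun out part =>
            let p := PySem.Chars.strip part
            if !p.isEmpty && PySem.Chars.isIn ['@'] p then out ++ [p] else out)
          out)
      acc
    = acc ++ (lines.flatMap (fun line => (PySem.Chars.splitOn line [',']).map PySem.Chars.strip)).filter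
        (fun p => !p.isEmpty && PySem.Chars.isIn ['@'] p) := by
  induction lines generalizing acc with
  | nil => simp
  | cons l ls ih =>
    simp only [List.foldl_cons, List.flatMap_cons, List.filter_append, ih]
    rw [PySem.List.foldl_append_if (fun part => !(PySem.Chars.strip part).isEmpty
          && PySem.Chars.isIn ['@'] (PySem.Chars.strip part)) PySem.Chars.strip]
    simp [List.filter_map, List.append_assoc, Function.comp_def]

theorem pv_strip_nil_iff (l : List Char) :
    PySem.Chars.strip l = [] ↔ ∀ c ∈ l, PySem.Chars.isspace c = true := by
  unfold PySem.Chars.strip PySem.Chars.rstrip PySem.Chars.lstrip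
  rw [List.reverse_eq_nil_iff, List.dropWhile_eq_nil_iff]
  constructor
  · intro h c hc
    rw [← List.takeWhile_append_dropWhile (p := PySem.Chars.isspace) (l := l)] at hc
    rcases List.mem_append.mp hc with h1 | h1
    · exact List.mem_takeWhile_imp h1
    · exact h c (by simpa using h1)
  · intro h c hc
    exact h c ((List.dropWhile_sublist _).subset (by simpa using hc))

theorem pv_split3_chars (s : List Char) : ∀ (buf tok : List Char), tok ∈ pvSplit3 s buf →
    ∀ c ∈ tok, c ∈ buf ∨ c ∈ s := by
  induction s with
  | nil =>
    intro buf tok htk c hc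
    simp [pvSplit3] at htk
    subst htk
    exact Or.inl hc
  | cons a t ih =>
    intro buf tok htk c hc
    simp only [pvSplit3] at htk
    by_cases ha : pvIsD a = true
    · rw [ha] at htk
      rw [if_pos rfl] at htk
      rcases List.mem_cons.mp htk with h | h
      · subst h; exact Or.inl hc
      · rcases ih [] tok h c hc with h' | h'
        · simp at h'
        · exact Or.inr (List.mem_cons_of_mem a h')
    · rw [Bool.eq_false_iff.mpr ha] at htk
      simp only [Bool.false_eq_true, if_false] at htk
      rcases ih (buf ++ [a]) tok htk c hc with h' | h'
      · rcases List.mem_append.mp h' with h'' | h''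
        · exact Or.inl h''
        · simp at h''; subst h''; exact Or.inr (List.mem_cons_self)
      · exact Or.inr (List.mem_cons_of_mem a h')

theorem pv_fold_id (toks : List (List Char)) (st : PySem.Set (List Char) × List (List Char))
    (h : ∀ tok ∈ toks, PySem.Chars.strip tok = []) : toks.foldl pvTStep st = st := by
  induction toks generalizing st with
  | nil => rfl
  | cons tok ts ih =>
    have hstep : pvTStep st tok = st := by
      simp [pvTStep, h tok (by simp)]
    simp only [List.foldl_cons, hstep]
    exact ih st (fun t ht => h t (List.mem_cons_of_mem _ ht))

-- ===== VERDICT (by name: the statement is the Claim_ definition above) =====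
theorem parse_recipient_list_spec : Claim_equal_parse_recipient_list := by
  intro raw _
  show parse_recipient_list raw = parse_recipient_list_alt raw
  have htok : pvSplit3 (raw.toList ++ ['\n']) [] = pvSplit3 raw.toList [] ++ [[]] :=
    pvSplit3_concat_delim _ [] '\n' (by decide)
  have hB : parse_recipient_list_alt raw =
      ((pvSplit3 raw.toList []).foldl pvTStep (PySem.Set.empty, [])).2.map String.ofList := by
    unfold parse_recipient_list_alt
    rw [pv_scan _ PySem.Set.empty [] [] _ _ htok]
  rw [hB]
  by_cases hs : (PySem.Chars.strip raw.toList).isEmpty = true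
  · have hall : ∀ c ∈ raw.toList, PySem.Chars.isspace c = true :=
      (pv_strip_nil_iff _).mp (by simpa [List.isEmpty_iff] using hs)
    have hid : (pvSplit3 raw.toList []).foldl pvTStep (PySem.Set.empty, []) = (PySem.Set.empty, []) := by
      apply pv_fold_id
      intro tok htk
      apply (pv_strip_nil_iff _).mpr
      intro c hcx
      rcases pv_split3_chars _ _ _ htk c hcx with h | h
      · simp at h
      · exact hall c h
    rw [hid]
    simp [parse_recipient_list, hs]
  · unfold parse_recipient_list
    simp only [hs, Bool.false_eq_true, if_false]
    rw [pv_out_eq, List.nil_append]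
    have hflat : (PySem.Chars.splitOn (PySem.Chars.replace raw.toList [';'] ['\n']) ['\n']).flatMap
        (fun line => (PySem.Chars.splitOn line [',']).map PySem.Chars.strip)
        = (pvSplit3 raw.toList []).map PySem.Chars.strip := by
      rw [replace_single, splitOn_single]
      simp only [splitOn_single]
      rw [← List.map_flatMap]
      rw [pv_comp (raw.toList.map pvSubst) [] [] [] (by simp [pvSplit1])]
      rw [List.nil_append, pvSplit2_map_subst]
    rw [hflat, List.foldl_filter, List.foldl_map]
    have hfun : (fun (st : PySem.Set (List Char) × List (List Char)) y =>
        if (!(PySem.Chars.strip y).isEmpty && PySem.Chars.isIn ['@'] (PySem.Chars.strip y)) = true then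
          (fun (st : PySem.Set (List Char) × List (List Char)) e =>
            let el := PySem.Chars.lower e
            if PySem.Set.contains st.1 el then st else (PySem.Set.add st.1 el, st.2 ++ [e])) st (PySem.Chars.strip y)
        else st) = pvTStep := by
      funext st y
      simp only [pvTStep]
      by_cases h1 : (PySem.Chars.strip y).isEmpty = true <;>
        by_cases h2 : PySem.Chars.isIn ['@'] (PySem.Chars.strip y) = true <;>
        by_cases h3 : PySem.Set.contains st.1 (PySem.Chars.lower (PySem.Chars.strip y)) = true <;>
        simp [h1, h2, h3]
    rw [hfun]
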